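-- pv_equiv track=rewrite | github.com/hessifer/Python | ProgrammingExpert/longest_unique_words.py | get_n_longest_unique_words
-- ===== SOURCE A (Python) =====
-- def get_unique_words(list_of_words):
--     unique_words = []
--
--     for word in list_of_words:
--         if list_of_words.count(word) == 1:
--             unique_words.append(word)
--
--     return unique_words
--
-- def get_n_longest_unique_words(words, n):
--     unique_words = get_unique_words(words)
--     results = []
--
--     while unique_words:  # could stop processing after n words len(results) < n
--         longest_idx = 0
--
--         for i, word in enumerate(unique_words):
--             if len(word) > len(unique_words[longest_idx]):
--                 longest_idx = i
--         results.append(unique_words.pop(longest_idx))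
--
--     return results[:n]
-- ===== SOURCE B (Python) =====
-- def get_n_longest_unique_words(words, n):
--     counts = {}
--     for w in words:
--         counts[w] = counts.get(w, 0) + 1
--     unique_words = [w for w in words if counts[w] == 1]
--     return sorted(unique_words, key=len, reverse=True)[:n]
-- ===== Notes on version B (the rewrite author's own statement) =====
-- stated objective: faster
-- what changed: Replaced the quadratic per-word list.count uniqueness scan with a single counting-dict pass, and replaced the quadratic repeated max-scan-and-pop selection loop with one stable sort by descending length followed by a [:n] slice.
import Mathlib
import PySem

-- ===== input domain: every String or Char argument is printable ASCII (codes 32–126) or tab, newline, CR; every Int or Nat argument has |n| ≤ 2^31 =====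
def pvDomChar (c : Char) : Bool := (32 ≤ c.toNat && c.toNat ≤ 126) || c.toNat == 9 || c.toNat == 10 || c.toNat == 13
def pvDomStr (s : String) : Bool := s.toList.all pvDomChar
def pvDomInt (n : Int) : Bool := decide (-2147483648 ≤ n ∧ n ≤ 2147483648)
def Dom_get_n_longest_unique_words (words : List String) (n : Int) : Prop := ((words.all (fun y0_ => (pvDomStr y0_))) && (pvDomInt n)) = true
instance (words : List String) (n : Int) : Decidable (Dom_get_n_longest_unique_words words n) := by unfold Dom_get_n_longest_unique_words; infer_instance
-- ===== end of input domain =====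

-- B replaces A's quadratic list.count uniqueness scan and repeated max-scan/pop selection loop
-- with a counting dict and one stable sort by descending length (objective: faster).

-- ===== PORT A =====
def get_unique_words (list_of_words : List String) : List String :=
  list_of_words.foldl
    (fun unique_words word =>
      if PySem.List.count list_of_words word == 1 then unique_words ++ [word] else unique_words)
    []

-- one iteration of A's while loop: find the index of the first longest word, then pop it
def pvFindPop (unique_words : List String) : Option (String × List String) :=
  let longest_idx :=
    (PySem.List.enumerate unique_words 0).foldl
      (fun longest_idx iw =>
        if PySem.Str.len iw.2 > PySem.Str.len (PySem.List.pyGetD unique_words longest_idx "")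
        then iw.1 else longest_idx)
      0
  PySem.List.pop? unique_words longest_idx

-- A's while loop (it stops exactly when the list is empty: pop? of [] is none)
def pvSelLoop (unique_words : List String) : List String :=
  match h : pvFindPop unique_words with
  | some (w, rest) => w :: pvSelLoop rest
  | none => []
termination_by unique_words.length
decreasing_by
  have := PySem.List.length_of_pop?_eq_some unique_words (by simpa [pvFindPop] using h)
  simp at this; omega

def get_n_longest_unique_words (words : List String) (n : Int) : List String :=
  PySem.List.slice (pvSelLoop (get_unique_words words)) none (some n)

-- ===== PORT B =====
def get_n_longest_unique_words_alt (words : List String) (n : Int) : List String :=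
  let counts := words.foldl (fun d w => d.insert w (d.getD w 0 + 1)) (PySem.Dict.empty : PySem.Dict String Int)
  let unique_words := words.filter (fun w => counts.getD w 0 == 1)
  PySem.List.slice (PySem.List.sorted unique_words PySem.Str.len true) none (some n)

-- ===== PRECONDITION & SPEC =====
def Spec_get_n_longest_unique_words (words : List String) (n : Int) (out : List String) : Prop := out = get_n_longest_unique_words_alt words n
instance (words : List String) (n : Int) (out : List String) : Decidable (Spec_get_n_longest_unique_words words n out) := by unfold Spec_get_n_longest_unique_words; infer_instance

-- ===== CLAIM (what is proved, stated in full; the proofs are below) =====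
def Claim_equal_get_n_longest_unique_words : Prop := ∀ (words : List String) (n : Int), Dom_get_n_longest_unique_words words n → Spec_get_n_longest_unique_words words n (get_n_longest_unique_words words n)

-- ===== LEMMAS AND PROOFS =====

-- A's uniqueness filter equals B's dict-count filter
theorem unique_eq (words : List String) :
    get_unique_words words =
      words.filter (fun w =>
        (words.foldl (fun d w => d.insert w (d.getD w 0 + 1)) (PySem.Dict.empty : PySem.Dict String Int)).getD w 0 == 1) := by
  unfold get_unique_words
  rw [PySem.List.foldl_append_if (fun w => PySem.List.count words w == 1) (fun w => w) words []]
  simp only [List.map_id']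
  apply List.filter_congr
  intro w _
  simp [PySem.Dict.getD_foldl_insert_add_one, PySem.List.count_eq]

-- invariant of A's argmax-scan over the remaining suffix
theorem argmax_inv (ws : List String) :
    ∀ (t : List String) (s li : Nat), ws.drop s = t → li ≤ s → li < ws.length →
    ∃ j : Nat,
      (PySem.List.enumerate t (s : Int)).foldl
        (fun longest_idx iw =>
          if PySem.Str.len iw.2 > PySem.Str.len (PySem.List.pyGetD ws longest_idx "")
          then iw.1 else longest_idx) (li : Int) = (j : Int) ∧
      j < ws.length ∧
      (∀ k, s ≤ k → k < ws.length → PySem.Str.len (ws.getD k "") ≤ PySem.Str.len (ws.getD j "")) ∧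
      (∀ k, s ≤ k → k < j → PySem.Str.len (ws.getD k "") < PySem.Str.len (ws.getD j "")) ∧
      (j = li ∨ (s ≤ j ∧ PySem.Str.len (ws.getD li "") < PySem.Str.len (ws.getD j ""))) := by
  intro t
  induction t with
  | nil =>
    intro s li hdrop hls hlen
    refine ⟨li, by simp [PySem.List.enumerate], hlen, ?_, ?_, Or.inl rfl⟩
    · intro k hk hk2
      exfalso
      have := congrArg List.length hdrop
      simp [List.length_drop] at this
      omega
    · intro k hk hk2; omega
  | cons x t' ih =>
    intro s li hdrop hls hlen
    have hslen : s < ws.length := by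
      have := congrArg List.length hdrop
      simp [List.length_drop] at this
      omega
    have hx : ws.getD s "" = x := by
      have h0 : ws[s]? = some x := by
        have h0' : (ws.drop s)[0]? = some x := by rw [hdrop]; rfl
        rw [List.getElem?_drop] at h0'
        simpa using h0'
      rw [List.getD_eq_getElem?_getD, h0]; rfl
    have hdrop' : ws.drop (s+1) = t' := by
      have : ws.drop (s+1) = (ws.drop s).tail := by
        rw [← List.drop_drop]; simp
      rw [this, hdrop]; rfl
    rw [PySem.List.enumerate_cons, List.foldl_cons]
    have hget : PySem.List.pyGetD ws (li : Int) "" = ws.getD li "" := PySem.List.pyGetD_natCast ws li ""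
    by_cases hc : PySem.Str.len x > PySem.Str.len (PySem.List.pyGetD ws (li : Int) "")
    · rw [if_pos hc]
      rw [hget, ← hx] at hc
      have hrec := ih (s+1) s hdrop' (by omega) hslen
      push_cast at hrec ⊢
      obtain ⟨j, hj1, hj2, hj3, hj4, hj5⟩ := hrec
      have hsj : PySem.Str.len (ws.getD s "") ≤ PySem.Str.len (ws.getD j "") := by
        rcases hj5 with h5 | ⟨_, h5⟩
        · rw [h5]
        · exact le_of_lt h5
      refine ⟨j, hj1, hj2, ?_, ?_, ?_⟩
      · intro k hk hk2
        rcases Nat.eq_or_lt_of_le hk with h | h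
        · rw [← h]; exact hsj
        · exact hj3 k h hk2
      · intro k hk hk2
        rcases Nat.eq_or_lt_of_le hk with h | h
        · rw [← h]
          rcases hj5 with h5 | ⟨h5a, h5b⟩
          · omega
          · exact h5b
        · exact hj4 k h hk2
      · right
        exact ⟨by rcases hj5 with h5 | ⟨h5a, _⟩; omega; omega, lt_of_lt_of_le hc hsj⟩
    · rw [if_neg hc]
      rw [hget, ← hx] at hc
      rw [gt_iff_lt, not_lt] at hc
      have hrec := ih (s+1) li hdrop' (by omega) hlen
      push_cast at hrec ⊢
      obtain ⟨j, hj1, hj2, hj3, hj4, hj5⟩ := hrec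
      have hli_le : PySem.Str.len (ws.getD li "") ≤ PySem.Str.len (ws.getD j "") := by
        rcases hj5 with h5 | ⟨_, h5⟩
        · rw [h5]
        · exact le_of_lt h5
      refine ⟨j, hj1, hj2, ?_, ?_, ?_⟩
      · intro k hk hk2
        rcases Nat.eq_or_lt_of_le hk with h | h
        · rw [← h]; exact le_trans hc hli_le
        · exact hj3 k h hk2
      · intro k hk hk2
        rcases Nat.eq_or_lt_of_le hk with h | h
        · rw [← h]
          rcases hj5 with h5 | ⟨h5a, h5b⟩
          · omega
          · exact lt_of_le_of_lt hc h5b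
        · exact hj4 k h hk2
      · rcases hj5 with h5 | ⟨h5a, h5b⟩
        · exact Or.inl h5
        · exact Or.inr ⟨by omega, h5b⟩


-- head-preservation of Python's stable insertion sort below the running maximum
theorem foldl_ins_cons (v : List String) :
    ∀ (acc : List String) (x : String), (∀ y ∈ v, ¬ PySem.Str.len x < PySem.Str.len y) →
    v.foldl (fun acc w => PySem.List.insertBy (fun a b => decide (PySem.Str.len b < PySem.Str.len a)) w acc) (x :: acc)
      = x :: v.foldl (fun acc w => PySem.List.insertBy (fun a b => decide (PySem.Str.len b < PySem.Str.len a)) w acc) acc := by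
  induction v with
  | nil => intro acc x _; rfl
  | cons y v ih =>
    intro acc x h
    simp only [List.foldl_cons]
    have h' := h y (by simp)
    simp only [PySem.Str.len, String.length_toList] at h'
    rw [show PySem.List.insertBy (fun a b => decide (PySem.Str.len b < PySem.Str.len a)) y (x :: acc)
        = x :: PySem.List.insertBy (fun a b => decide (PySem.Str.len b < PySem.Str.len a)) y acc from by
      simp [PySem.List.insertBy, PySem.Str.len, String.length_toList]
      omega]
    exact ih _ _ (fun z hz => h z (by simp [hz]))


-- pulling the first maximum to the front of a stable descending sort
theorem sorted_split (u v : List String) (m : String)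
    (hu : ∀ y ∈ u, PySem.Str.len y < PySem.Str.len m)
    (hv : ∀ y ∈ v, PySem.Str.len y ≤ PySem.Str.len m) :
    PySem.List.sorted (u ++ m :: v) PySem.Str.len true
      = m :: PySem.List.sorted (u ++ v) PySem.Str.len true := by
  rw [PySem.List.sorted_rev_eq_foldl_insertBy, PySem.List.sorted_rev_eq_foldl_insertBy]
  rw [List.foldl_append, List.foldl_append, List.foldl_cons]
  have hmem : ∀ y ∈ List.foldl (fun acc x => PySem.List.insertBy (fun a b => decide (PySem.Str.len b < PySem.Str.len a)) x acc) [] u, y ∈ u := by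
    intro y hy
    have := (PySem.List.mem_sorted u PySem.Str.len true y).mp
      (by rwa [PySem.List.sorted_rev_eq_foldl_insertBy])
    exact this
  have hins : PySem.List.insertBy (fun a b => decide (PySem.Str.len b < PySem.Str.len a)) m
      (List.foldl (fun acc x => PySem.List.insertBy (fun a b => decide (PySem.Str.len b < PySem.Str.len a)) x acc) [] u)
      = m :: List.foldl (fun acc x => PySem.List.insertBy (fun a b => decide (PySem.Str.len b < PySem.Str.len a)) x acc) [] u := by
    cases hA : List.foldl (fun acc x => PySem.List.insertBy (fun a b => decide (PySem.Str.len b < PySem.Str.len a)) x acc) [] u with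
    | nil => rfl
    | cons a rest =>
      have ha : a ∈ u := hmem a (by rw [hA]; simp)
      have ha' := hu a ha
      simp only [PySem.Str.len, String.length_toList] at ha'
      simp [PySem.List.insertBy, PySem.Str.len, String.length_toList]
      omega
  rw [hins, foldl_ins_cons v _ m (fun y hy => not_lt.mpr (hv y hy))]


-- A's selection loop is B's stable sort by descending length
theorem selLoop_sorted (N : Nat) :
    ∀ ws : List String, ws.length ≤ N → pvSelLoop ws = PySem.List.sorted ws PySem.Str.len true := by
  induction N with
  | zero =>
    intro ws hlen
    have : ws = [] := by cases ws <;> simp_all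
    subst this
    rw [pvSelLoop]
    rfl
  | succ N ih =>
    intro ws hlen
    cases hws : ws with
    | nil =>
      subst hws
      rw [pvSelLoop]
      rfl
    | cons x t =>
      have hne : 0 < ws.length := by rw [hws]; simp
      rw [← hws]
      clear hws
      obtain ⟨j, hj1, hj2, hj3, hj4, _⟩ :=
        argmax_inv ws ws 0 0 (by simp) (le_refl 0) hne
      have hfp : pvFindPop ws = some (ws[j], ws.eraseIdx j) := by
        unfold pvFindPop
        simp only [Nat.cast_zero] at hj1
        rw [hj1]
        exact PySem.List.pop?_natCast ws j hj2
      have hstep : pvSelLoop ws = ws[j] :: pvSelLoop (ws.eraseIdx j) := by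
        rw [pvSelLoop]
        split
        · rename_i w rest heq
          rw [hfp] at heq
          injection heq with heq'
          rw [Prod.ext_iff] at heq'
          obtain ⟨h1, h2⟩ := heq'
          simp at h1 h2
          rw [h1, h2]
        · rename_i heq
          rw [hfp] at heq
          exact absurd heq (by simp)
      have hlen' : (ws.eraseIdx j).length ≤ N := by
        have := List.length_eraseIdx_of_lt hj2
        omega
      rw [hstep, ih _ hlen']
      have hsplit := sorted_split (ws.take j) (ws.drop (j+1)) (ws[j])
        (by
          intro y hy
          obtain ⟨k, hk, rfl⟩ := List.getElem_of_mem hy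
          have hkj : k < j := by simp [List.length_take] at hk; omega
          have hkl : k < ws.length := by omega
          have := hj4 k (Nat.zero_le k) hkj
          rw [List.getD_eq_getElem ws "" hkl, List.getD_eq_getElem ws "" hj2] at this
          simpa [List.getElem_take] using this )
        (by
          intro y hy
          obtain ⟨k, hk, rfl⟩ := List.getElem_of_mem hy
          have hkl : j + 1 + k < ws.length := by simp [List.length_drop] at hk; omega
          have := hj3 (j+1+k) (Nat.zero_le _) hkl
          rw [List.getD_eq_getElem ws "" hkl, List.getD_eq_getElem ws "" hj2] at this
          simpa [List.getElem_drop] using this )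
      rw [List.eraseIdx_eq_take_drop_succ]
      rw [← hsplit]
      congr 1
      rw [← List.drop_eq_getElem_cons hj2, List.take_append_drop]


-- ===== VERDICT (by name: the statement is the Claim_ definition above) =====
theorem get_n_longest_unique_words_spec : Claim_equal_get_n_longest_unique_words := by
  intro words n _
  unfold Spec_get_n_longest_unique_words get_n_longest_unique_words get_n_longest_unique_words_alt
  rw [unique_eq, selLoop_sorted (words.filter _).length _ le_rfl]
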